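-- pv_equiv track=rewrite | github.com/jgeller11/abstract-aggregator | funcs.py | scrub_html_tags
-- ===== SOURCE A (Python) =====
-- def scrub_html_tags(string : str) -> str:
--     output = ""
--     open = False
--     for c in string:
--         if (c == "<"):
--             open = True
--         elif (c == ">"):
--             open = False
--             output += " "
--         elif not open:
--             output += c
--     while "  " in output:
--         output = output.replace("  ", " ")
--     return output
-- ===== SOURCE B (Python) =====
-- # single-pass scan: tag-open flag + inline space-run collapsing (no replace passes)
-- def scrub_html_tags(string: str) -> str:
--     out = []
--     open_ = False
--     prev_space = False  # last emitted char was a space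
--     for c in string:
--         if c == "<":
--             open_ = True
--         elif c == ">":
--             open_ = False
--             if not prev_space:
--                 out.append(" ")
--                 prev_space = True
--         elif not open_:
--             if c == " ":
--                 if not prev_space:
--                     out.append(" ")
--                     prev_space = True
--             else:
--                 out.append(c)
--                 prev_space = False
--     return "".join(out)
-- ===== Notes on version B (the rewrite author's own statement) =====
-- stated objective: alternative
-- what changed: B collapses runs of blanks inline during a single scan (tag-open flag plus a previous-emitted-was-blank flag) instead of A's build-then-fixpoint loop of whole-string double-blank replace passes; same measured cost on typical inputs.
import Mathlib
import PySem

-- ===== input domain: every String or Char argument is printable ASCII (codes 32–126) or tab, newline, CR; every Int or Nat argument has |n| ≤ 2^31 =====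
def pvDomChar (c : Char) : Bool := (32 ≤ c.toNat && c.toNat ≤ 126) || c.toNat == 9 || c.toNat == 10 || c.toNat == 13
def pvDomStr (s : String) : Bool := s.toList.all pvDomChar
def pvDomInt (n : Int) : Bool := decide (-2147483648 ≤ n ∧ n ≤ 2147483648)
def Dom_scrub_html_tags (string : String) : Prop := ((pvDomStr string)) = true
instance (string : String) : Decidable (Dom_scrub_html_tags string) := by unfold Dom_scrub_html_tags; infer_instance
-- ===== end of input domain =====

-- B collapses space runs inline during a single scan instead of A's repeated
-- whole-string replace("  ", " ") passes until fixpoint (objective: alternative).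

-- ===== PORT A =====
-- characterisation of one Python pass s.replace("  ", " "), needed only so that the
-- port's while-loop (collapseLoop) can cite oneRepl_length_lt in its decreasing_by
def oneRepl : List Char → List Char
  | ' ' :: ' ' :: t => ' ' :: oneRepl t
  | c :: t => c :: oneRepl t
  | [] => []

theorem oneRepl_cons (c : Char) (t : List Char)
    (h : ∀ u, c = ' ' → t = ' ' :: u → False) : oneRepl (c :: t) = c :: oneRepl t := by
  rw [oneRepl.eq_def]
  split
  · rename_i t' heq
    injection heq with h1 h2
    exact (h t' h1 h2).elim
  · rename_i c' t' heq
    injection heq with h1 h2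
    rw [h1, h2]
  · rename_i heq; exact absurd heq (by simp)

theorem oneRepl_length_le (s : List Char) : (oneRepl s).length ≤ s.length := by
  induction s using oneRepl.induct with
  | case1 t ih => simp [oneRepl]; omega
  | case2 c t hne ih => rw [oneRepl_cons c t hne]; simpa using ih
  | case3 => simp [oneRepl]

theorem go_eq_oneRepl (fuel : Nat) (l acc : List Char) (h : l.length ≤ fuel) :
    PySem.Chars.replace.go [' ', ' '] [' '] fuel l acc = acc.reverse ++ oneRepl l := by
  induction fuel generalizing l acc with
  | zero =>
      have : l = [] := List.eq_nil_of_length_eq_zero (Nat.le_zero.mp h)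
      subst this; simp [PySem.Chars.replace.go, oneRepl]
  | succ n ih =>
      match l with
      | [] => simp [PySem.Chars.replace.go, oneRepl]
      | c :: t =>
          rw [PySem.Chars.replace.go]
          simp only [List.length_cons] at h
          by_cases hpre : [' ', ' '].isPrefixOf (c :: t) = true
          · have hp := List.isPrefixOf_iff_prefix.mp hpre
            match t with
            | [] => exact absurd hp.length_le (by simp)
            | d :: u =>
                rw [List.cons_prefix_cons] at hp
                obtain ⟨h1, hp2⟩ := hp
                rw [List.cons_prefix_cons] at hp2
                obtain ⟨h2, -⟩ := hp2
                subst h1; subst h2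
                rw [if_pos hpre]
                rw [show List.drop [' ', ' '].length (' ' :: ' ' :: u) = u from rfl,
                    show [' '].reverse ++ acc = ' ' :: acc from rfl,
                    ih u (' ' :: acc) (by simp only [List.length_cons] at h; omega)]
                simp [oneRepl]
          · rw [if_neg hpre]
            rw [ih t (c :: acc) (by omega)]
            rw [oneRepl_cons c t (fun u hc ht => by
              subst hc; subst ht; exact hpre (by simp [List.isPrefixOf]))]
            simp

theorem replace_eq_oneRepl (s : List Char) :
    PySem.Chars.replace s [' ', ' '] [' '] = oneRepl s := by
  simpa [PySem.Chars.replace] using go_eq_oneRepl s.length s [] le_rfl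

theorem oneRepl_length_lt (s : List Char) (h : [' ', ' '] <:+: s) :
    (oneRepl s).length < s.length := by
  induction s using oneRepl.induct with
  | case1 t ih =>
      have := oneRepl_length_le t
      simp [oneRepl]; omega
  | case2 c t hne ih =>
      rcases (List.infix_cons_iff).mp h with hp | hi
      · exfalso
        match t with
        | [] => exact absurd hp.length_le (by simp)
        | d :: u =>
            rw [List.cons_prefix_cons] at hp
            obtain ⟨h1, hp2⟩ := hp
            rw [List.cons_prefix_cons] at hp2
            exact hne u h1.symm (by rw [← hp2.1])
      · rw [oneRepl_cons c t hne]
        have := ih hi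
        simp only [List.length_cons]
        omega
  | case3 => simp at h

-- the Python while-loop:  while "  " in output: output = output.replace("  ", " ")
def collapseLoop (out : List Char) : List Char :=
  if h : PySem.Chars.isIn [' ', ' '] out then
    collapseLoop (PySem.Chars.replace out [' ', ' '] [' '])
  else out
termination_by out.length
decreasing_by
  rw [replace_eq_oneRepl]
  exact oneRepl_length_lt out ((PySem.Chars.isIn_iff_infix _ _).mp h)

-- one step of A's for-loop; state = (output, open)
def stepA (s : List Char × Bool) (c : Char) : List Char × Bool :=
  if c = '<' then (s.1, true)
  else if c = '>' then (s.1 ++ [' '], false)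
  else if ¬ s.2 then (s.1 ++ [c], s.2)
  else s

def scrub_html_tags (string : String) : String :=
  let st := string.toList.foldl stepA ([], false)
  String.ofList (collapseLoop st.1)

-- ===== PORT B =====
-- one step of Source B's loop; state = (out, open_, prev_space)
def stepB (s : List Char × Bool × Bool) (c : Char) : List Char × Bool × Bool :=
  if c = '<' then (s.1, true, s.2.2)
  else if c = '>' then
    (if ¬ s.2.2 then (s.1 ++ [' '], false, true) else (s.1, false, s.2.2))
  else if ¬ s.2.1 then
    (if c = ' ' then
      (if ¬ s.2.2 then (s.1 ++ [' '], s.2.1, true) else s)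
    else (s.1 ++ [c], s.2.1, false))
  else s

def scrub_html_tags_alt (string : String) : String :=
  let st := string.toList.foldl stepB ([], false, false)
  String.ofList st.1

-- ===== PRECONDITION & SPEC =====
def Spec_scrub_html_tags (string : String) (out : String) : Prop := out = scrub_html_tags_alt string
instance (string : String) (out : String) : Decidable (Spec_scrub_html_tags string out) := by unfold Spec_scrub_html_tags; infer_instance

-- ===== CLAIM (what is proved, stated in full; the proofs are below) =====
def Claim_equal_scrub_html_tags : Prop := ∀ (string : String), Dom_scrub_html_tags string → Spec_scrub_html_tags string (scrub_html_tags string)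

-- ===== LEMMAS AND PROOFS =====

-- squeeze runs of spaces; prev = "the previously emitted character was a space"
def sqz (prev : Bool) : List Char → List Char
  | [] => []
  | c :: t =>
      if c = ' ' then (if prev then sqz true t else ' ' :: sqz true t)
      else c :: sqz false t

theorem sqz_oneRepl (s : List Char) : ∀ prev, sqz prev (oneRepl s) = sqz prev s := by
  induction s using oneRepl.induct with
  | case1 t ih =>
      intro prev
      simp only [oneRepl, sqz]
      cases prev <;> simp [ih]
  | case2 c t hne ih =>
      intro prev
      rw [oneRepl_cons c t hne]
      by_cases h : c = ' '
      · subst h; cases prev <;> simp [sqz, ih]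
      · simp [sqz, h, ih]
  | case3 => intro prev; simp [oneRepl]

theorem sqz_of_no_dbl (s : List Char) (h : ¬ [' ', ' '] <:+: s) :
    sqz false s = s ∧ (s.head? ≠ some ' ' → sqz true s = s) := by
  induction s with
  | nil => simp [sqz]
  | cons c t ih =>
      have hnp : ¬ [' ', ' '] <+: c :: t := fun hp => h (List.infix_cons_iff.mpr (Or.inl hp))
      have hni : ¬ [' ', ' '] <:+: t := fun hi => h (List.infix_cons_iff.mpr (Or.inr hi))
      obtain ⟨ih1, ih2⟩ := ih hni
      by_cases hc : c = ' '
      · subst hc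
        have ht : t.head? ≠ some ' ' := by
          intro hh
          rcases t with _ | ⟨d, u⟩
          · simp at hh
          · simp at hh; subst hh
            exact hnp (by simp [List.cons_prefix_cons])
        constructor
        · simp [sqz, ih2 ht]
        · simp
      · constructor
        · simp [sqz, hc, ih1]
        · intro _; simp [sqz, hc, ih1]

theorem collapseLoop_eq_sqz (s : List Char) : collapseLoop s = sqz false s := by
  induction s using collapseLoop.induct with
  | case1 s hin ih =>
      rw [collapseLoop, dif_pos hin, ih, replace_eq_oneRepl, sqz_oneRepl]
  | case2 s hin =>
      rw [collapseLoop, dif_neg hin]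
      exact (sqz_of_no_dbl s (fun hi => hin ((PySem.Chars.isIn_iff_infix _ _).mpr hi))).1.symm

theorem fold_inv (l : List Char) (Aout Bout : List Char) (op prev : Bool)
    (H : ∀ rest, sqz false (Aout ++ rest) = Bout ++ sqz prev rest) :
    ∀ rest,
      sqz false ((l.foldl stepA (Aout, op)).1 ++ rest)
        = (l.foldl stepB (Bout, op, prev)).1 ++ sqz (l.foldl stepB (Bout, op, prev)).2.2 rest := by
  induction l generalizing Aout Bout op prev with
  | nil => simpa using H
  | cons c t ih =>
      simp only [List.foldl_cons]
      by_cases h1 : c = '<'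
      · simp only [stepA, stepB, if_pos h1]
        exact ih Aout Bout true prev H
      · by_cases h2 : c = '>'
        · simp only [stepA, stepB, if_neg h1, if_pos h2]
          cases prev with
          | false =>
              simp only [if_pos (show ¬false = true from by decide)]
              refine ih _ _ false true (fun rest => ?_)
              have := H (' ' :: rest)
              simp only [sqz, reduceIte] at this
              simpa [List.append_assoc] using this
          | true =>
              simp only []
              refine ih _ _ false true (fun rest => ?_)
              have := H (' ' :: rest)
              simpa [sqz] using this
        · simp only [stepA, stepB, if_neg h1, if_neg h2]
          cases op with
          | true =>
              simp only []
              exact ih Aout Bout true prev H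
          | false =>
              simp only [if_pos (show ¬false = true from by decide)]
              by_cases hsp : c = ' '
              · subst hsp
                simp only [reduceIte]
                cases prev with
                | false =>
                    simp only [if_pos (show ¬false = true from by decide)]
                    refine ih _ _ false true (fun rest => ?_)
                    have := H (' ' :: rest)
                    simp only [sqz, reduceIte] at this
                    simpa [List.append_assoc] using this
                | true =>
                    simp only []
                    refine ih _ _ false true (fun rest => ?_)
                    have := H (' ' :: rest)
                    simpa [sqz] using this
              · simp only [if_neg hsp]
                refine ih _ _ false false (fun rest => ?_)
                have := H (c :: rest)
                simp only [sqz, if_neg hsp] at this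
                simpa [List.append_assoc] using this

-- ===== VERDICT (by name: the statement is the Claim_ definition above) =====
theorem scrub_html_tags_spec : Claim_equal_scrub_html_tags := by
  intro s _
  have h := fold_inv s.toList [] [] false false (fun rest => by simp) []
  simp only [List.append_nil] at h
  unfold Spec_scrub_html_tags scrub_html_tags scrub_html_tags_alt
  show String.ofList (collapseLoop (List.foldl stepA ([], false) s.toList).1)
      = String.ofList (List.foldl stepB ([], false, false) s.toList).1
  rw [collapseLoop_eq_sqz, h]
  cases (List.foldl stepB ([], false, false) s.toList).2.2 <;> simp [sqz]
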